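-- pv_equiv track=rewrite | github.com/hoangphu7122002/sa_web_mining | text_processor.py | replace_double_punc
-- ===== SOURCE A (Python) =====
-- import string
--
-- punctuation = string.punctuation
--
-- def replace_double_punc(text):
--     """Replace repeated punctuation marks with single ones.
--
--     Args:
--         text (str): Input text
--
--     Returns:
--         str: Text with normalized punctuation
--
--     Example:
--         >>> processor.replace_double_punc("hello!!! world...")
--         "hello! world"
--     """
--     text = text.replace('...', '')
--     for punc in punctuation:
--         double_punc = punc + punc
--         while double_punc in text:
--             text = text.replace(double_punc, punc)
--         double_punc_2 = punc + ' ' + punc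
--         while double_punc_2 in text:
--             text = text.replace(double_punc_2, punc)
--     return text
-- ===== SOURCE B (Python) =====
-- import string
--
-- punctuation = string.punctuation
--
-- def replace_double_punc(text):
--     """Replace repeated punctuation marks with single ones (single streaming pass)."""
--     text = text.replace('...', '')
--     out = []
--     for c in text:
--         if c in punctuation:
--             if out and out[-1] == c:
--                 continue
--             if len(out) >= 2 and out[-1] == ' ' and out[-2] == c:
--                 out.pop()
--                 continue
--         out.append(c)
--     return ''.join(out)
-- ===== Notes on version B (the rewrite author's own statement) =====
-- stated objective: simpler
-- what changed: Replaces the 32 per-punctuation repeated str.replace fixpoint loops with one left-to-right streaming pass that builds the output, skipping a punctuation char that repeats the last output char and popping a single space between equal punctuation chars.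
import Mathlib
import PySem

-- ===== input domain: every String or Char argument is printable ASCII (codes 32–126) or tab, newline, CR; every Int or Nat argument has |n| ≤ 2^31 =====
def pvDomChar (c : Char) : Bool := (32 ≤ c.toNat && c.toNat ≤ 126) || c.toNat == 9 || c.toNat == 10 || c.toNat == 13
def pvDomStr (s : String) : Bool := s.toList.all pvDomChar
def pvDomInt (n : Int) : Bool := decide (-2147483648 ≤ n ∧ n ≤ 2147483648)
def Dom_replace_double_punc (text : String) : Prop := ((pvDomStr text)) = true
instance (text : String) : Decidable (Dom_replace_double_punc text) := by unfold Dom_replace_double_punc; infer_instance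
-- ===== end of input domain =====

-- B replaces A's 32 repeated str.replace fixpoint loops by one streaming left-to-right pass (simpler, one traversal).

-- ===== PORT A =====
-- string.punctuation
def pvPunct : List Char := "!\"#$%&'()*+,-./:;<=>?@[\\]^_`{|}~".toList

-- 'while double_punc in text: text = text.replace(double_punc, punc)'; the fuel t.length+1
-- only bounds the loop (each replace of a present substring shortens the text, so the loop
-- provably reaches its fixpoint before the fuel runs out — lemma pvWhile_fix below).
def pvWhile (sub rep : List Char) : Nat → List Char → List Char
  | 0, t => t
  | n+1, t => if PySem.Chars.isIn sub t then pvWhile sub rep n (PySem.Chars.replace t sub rep) else t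

def replace_double_punc (text : String) : String :=
  let t0 := PySem.Chars.replace text.toList ['.', '.', '.'] []
  String.ofList (pvPunct.foldl (fun t p =>
    let t1 := pvWhile [p, p] [p] (t.length + 1) t
    pvWhile [p, ' ', p] [p] (t1.length + 1) t1) t0)

-- ===== PORT B =====
-- the body of Source B's 'for c in text' loop; 'out' is kept in REVERSE (Python appends at the
-- right and looks at out[-1]/out[-2]; here the head/second element), reversed once at the end.
def pvStep (out : List Char) (c : Char) : List Char :=
  if pvPunct.contains c then
    if out.head? = some c then out
    else if out.head? = some ' ' ∧ out[1]? = some c then out.tail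
    else c :: out
  else c :: out

def replace_double_punc_alt (text : String) : String :=
  let t0 := PySem.Chars.replace text.toList ['.', '.', '.'] []
  String.ofList ((t0.foldl pvStep []).reverse)

-- ===== PRECONDITION & SPEC =====
def Spec_replace_double_punc (text : String) (out : String) : Prop := out = replace_double_punc_alt text
instance (text : String) (out : String) : Decidable (Spec_replace_double_punc text out) := by unfold Spec_replace_double_punc; infer_instance

-- ===== CLAIM (what is proved, stated in full; the proofs are below) =====
def Claim_equal_replace_double_punc : Prop := ∀ (text : String), Dom_replace_double_punc text → Spec_replace_double_punc text (replace_double_punc text)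

-- ===== LEMMAS AND PROOFS =====

-- Clean structural form of PySem.Chars.replace for a nonempty pattern c0 :: oldt.
def pvRepl (c0 : Char) (oldt new : List Char) : List Char → List Char
  | [] => []
  | c :: t =>
    if (c0 :: oldt).isPrefixOf (c :: t) then new ++ pvRepl c0 oldt new (t.drop oldt.length)
    else c :: pvRepl c0 oldt new t
termination_by l => l.length
decreasing_by
  · simp
  · simp

lemma pvRepl_nil (c0 : Char) (oldt new : List Char) : pvRepl c0 oldt new [] = [] := by
  simp [pvRepl]

lemma pvRepl_cons (c0 : Char) (oldt new : List Char) (c : Char) (t : List Char) :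
    pvRepl c0 oldt new (c :: t) =
      if (c0 :: oldt).isPrefixOf (c :: t) then new ++ pvRepl c0 oldt new (t.drop oldt.length)
      else c :: pvRepl c0 oldt new t := by
  rw [pvRepl]

lemma go_eq_pvRepl (c0 : Char) (oldt new : List Char) :
    ∀ (fuel : Nat) (l acc : List Char), l.length ≤ fuel →
      PySem.Chars.replace.go (c0 :: oldt) new fuel l acc = acc.reverse ++ pvRepl c0 oldt new l := by
  intro fuel
  induction fuel with
  | zero =>
    intro l acc hl
    have : l = [] := by cases l with | nil => rfl | cons a t => simp at hl
    subst this
    simp [PySem.Chars.replace.go, pvRepl_nil]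
  | succ n ih =>
    intro l acc hl
    cases l with
    | nil => simp [PySem.Chars.replace.go, pvRepl_nil]
    | cons c t =>
      rw [PySem.Chars.replace.go, pvRepl_cons]
      split
      · rw [ih]
        · simp [List.drop_succ_cons]
        · simp only [List.length_cons] at hl
          simp only [List.length_cons, List.drop_succ_cons, List.length_drop]
          omega
      · rw [ih]
        · simp
        · simp only [List.length_cons] at hl; omega

lemma replace_eq_pvRepl (c0 : Char) (oldt new s : List Char) :
    PySem.Chars.replace s (c0 :: oldt) new = pvRepl c0 oldt new s := by
  rw [PySem.Chars.replace]
  simp only [List.isEmpty_cons, Bool.false_eq_true, if_false]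
  simpa using go_eq_pvRepl c0 oldt new s.length s [] le_rfl

lemma head?_pvRepl (c0 : Char) (oldt t : List Char) :
    (pvRepl c0 oldt [c0] t).head? = t.head? := by
  cases t with
  | nil => simp [pvRepl_nil]
  | cons c t =>
    rw [pvRepl_cons]
    split
    · next h =>
      obtain ⟨he, -⟩ := List.cons_prefix_cons.mp (List.isPrefixOf_iff_prefix.mp h)
      simp [he]
    · simp

lemma prefix_pvRepl (c0 : Char) (oldt : List Char) :
    ∀ (bad t : List Char), c0 ∉ bad → bad <+: pvRepl c0 oldt [c0] t → bad <+: t := by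
  intro bad
  induction bad with
  | nil => intro t _ _; exact List.nil_prefix
  | cons b bs ih =>
    intro t hmem hpre
    cases t with
    | nil => rw [pvRepl_nil] at hpre; exact absurd (List.prefix_nil.mp hpre) (by simp)
    | cons c t2 =>
      rw [pvRepl_cons] at hpre
      split at hpre
      · simp only [List.singleton_append] at hpre
        obtain ⟨hb, -⟩ := List.cons_prefix_cons.mp hpre
        exact absurd (hb ▸ List.mem_cons_self) hmem
      · obtain ⟨hb, hbs⟩ := List.cons_prefix_cons.mp hpre
        subst hb
        exact List.cons_prefix_cons.mpr
          ⟨rfl, ih t2 (fun h => hmem (List.mem_cons_of_mem _ h)) hbs⟩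

lemma infix_pvRepl (c0 : Char) (oldt : List Char) :
    ∀ (t bad : List Char), c0 ∉ bad → bad ≠ [] → bad <:+: pvRepl c0 oldt [c0] t → bad <:+: t := by
  suffices H : ∀ (n : Nat) (t bad : List Char), t.length ≤ n → c0 ∉ bad → bad ≠ [] →
      bad <:+: pvRepl c0 oldt [c0] t → bad <:+: t by
    intro t bad h1 h2 h3; exact H t.length t bad le_rfl h1 h2 h3
  intro n
  induction n with
  | zero =>
    intro t bad hlen hmem hne hinf
    have : t = [] := by cases t with | nil => rfl | cons a t => simp at hlen
    subst this
    rw [pvRepl_nil] at hinf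
    exact absurd (List.eq_nil_of_infix_nil hinf) hne
  | succ n ih =>
    intro t bad hlen hmem hne hinf
    cases t with
    | nil =>
      rw [pvRepl_nil] at hinf
      exact absurd (List.eq_nil_of_infix_nil hinf) hne
    | cons c t2 =>
      rw [pvRepl_cons] at hinf
      split at hinf
      · next hm =>
        simp only [List.singleton_append] at hinf
        rcases List.infix_cons_iff.mp hinf with hp | hi
        · refine (prefix_pvRepl c0 oldt bad (c :: t2) hmem ?_).isInfix
          rw [pvRepl_cons, if_pos hm]; simpa using hp
        · have h2 : bad <:+: t2.drop oldt.length := by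
            refine ih (t2.drop oldt.length) bad ?_ hmem hne hi
            simp only [List.length_cons] at hlen
            simp only [List.length_drop]; omega
          exact List.infix_cons (h2.trans (List.drop_suffix _ _).isInfix)
      · next hm =>
        rcases List.infix_cons_iff.mp hinf with hp | hi
        · refine (prefix_pvRepl c0 oldt bad (c :: t2) hmem ?_).isInfix
          rw [pvRepl_cons, if_neg hm]; exact hp
        · refine List.infix_cons (ih t2 bad ?_ hmem hne hi)
          simp only [List.length_cons] at hlen; omega

-- replacing occurrences of 'p p' by 'p' never creates a new 'pp'
lemma pp_pvRepl (p : Char) :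
    ∀ t : List Char, ¬ [p, p] <:+: t → ¬ [p, p] <:+: pvRepl p [' ', p] [p] t := by
  suffices H : ∀ (n : Nat) (t : List Char), t.length ≤ n → ¬ [p, p] <:+: t →
      ¬ [p, p] <:+: pvRepl p [' ', p] [p] t by
    intro t h; exact H t.length t le_rfl h
  intro n
  induction n with
  | zero =>
    intro t hlen h
    have : t = [] := by cases t with | nil => rfl | cons a t => simp at hlen
    subst this; rw [pvRepl_nil]; simp
  | succ n ih =>
    intro t hlen h hinf
    cases t with
    | nil => rw [pvRepl_nil] at hinf; simp at hinf
    | cons c t2 =>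
      rw [pvRepl_cons] at hinf
      split at hinf
      · next hm =>
        obtain ⟨u, hu⟩ := List.isPrefixOf_iff_prefix.mp hm
        simp only [List.cons_append, List.nil_append] at hu
        obtain ⟨hc, ht2⟩ := List.cons.inj hu
        subst hc
        subst ht2
        simp only [List.length_cons, List.length_nil, List.drop_succ_cons, List.drop_zero,
          List.singleton_append] at hinf
        rcases List.infix_cons_iff.mp hinf with hp | hi
        · obtain ⟨-, hp'⟩ := List.cons_prefix_cons.mp hp
          have hu : u.head? = some p := by
            have := head?_pvRepl p [' ', p] u
            obtain ⟨r, hr⟩ := hp'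
            rw [← this, ← hr]; rfl
          obtain ⟨u2, rfl⟩ : ∃ u2, u = p :: u2 := by
            cases u with
            | nil => simp at hu
            | cons a u2 =>
              simp only [List.head?_cons, Option.some.injEq] at hu
              exact ⟨u2, by rw [hu]⟩
          exact h ⟨[p, ' '], u2, by simp⟩
        · refine ih u ?_ ?_ hi
          · simp only [List.length_cons] at hlen; omega
          · intro hbad
            exact h (List.infix_cons (List.infix_cons (List.infix_cons hbad)))
      · next hm =>
        rcases List.infix_cons_iff.mp hinf with hp | hi
        · obtain ⟨hc, hp'⟩ := List.cons_prefix_cons.mp hp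
          have ht2 : t2.head? = some p := by
            have := head?_pvRepl p [' ', p] t2
            obtain ⟨r, hr⟩ := hp'
            rw [← this, ← hr]; rfl
          obtain ⟨u2, rfl⟩ : ∃ u2, t2 = p :: u2 := by
            cases t2 with
            | nil => simp at ht2
            | cons a u2 =>
              simp only [List.head?_cons, Option.some.injEq] at ht2
              exact ⟨u2, by rw [ht2]⟩
          subst hc
          exact h ⟨[], u2, by simp⟩
        · refine ih t2 ?_ (fun hbad => h (List.infix_cons hbad)) hi
          simp only [List.length_cons] at hlen; omega

lemma len_pvRepl_le (c0 : Char) (oldt : List Char) :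
    ∀ t : List Char, (pvRepl c0 oldt [c0] t).length ≤ t.length := by
  suffices H : ∀ (n : Nat) (t : List Char), t.length ≤ n →
      (pvRepl c0 oldt [c0] t).length ≤ t.length from fun t => H t.length t le_rfl
  intro n
  induction n with
  | zero =>
    intro t hlen
    have : t = [] := by cases t with | nil => rfl | cons a t => simp at hlen
    subst this; simp [pvRepl_nil]
  | succ n ih =>
    intro t hlen
    cases t with
    | nil => simp [pvRepl_nil]
    | cons c t2 =>
      rw [pvRepl_cons]
      split
      · have h1 := ih (t2.drop oldt.length)
          (by simp only [List.length_drop]; simp only [List.length_cons] at hlen; omega)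
        simp only [List.singleton_append, List.length_cons, List.length_drop] at h1 ⊢
        omega
      · have h1 := ih t2 (by simp only [List.length_cons] at hlen; omega)
        simp only [List.length_cons]
        omega

lemma len_pvRepl_lt (c0 : Char) (oldt : List Char) (h0 : oldt ≠ []) :
    ∀ t : List Char, (c0 :: oldt) <:+: t → (pvRepl c0 oldt [c0] t).length < t.length := by
  suffices H : ∀ (n : Nat) (t : List Char), t.length ≤ n → (c0 :: oldt) <:+: t →
      (pvRepl c0 oldt [c0] t).length < t.length from fun t => H t.length t le_rfl
  intro n
  induction n with
  | zero =>
    intro t hlen hinf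
    have : t = [] := by cases t with | nil => rfl | cons a t => simp at hlen
    subst this
    exact absurd (List.eq_nil_of_infix_nil hinf) (by simp)
  | succ n ih =>
    intro t hlen hinf
    cases t with
    | nil => exact absurd (List.eq_nil_of_infix_nil hinf) (by simp)
    | cons c t2 =>
      rw [pvRepl_cons]
      split
      · next hm =>
        have hlenm : oldt.length ≤ t2.length := by
          obtain ⟨-, hrest⟩ := List.cons_prefix_cons.mp (List.isPrefixOf_iff_prefix.mp hm)
          exact hrest.length_le
        have h1 := len_pvRepl_le c0 oldt (t2.drop oldt.length)
        have h2 : oldt.length ≠ 0 := by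
          cases oldt with | nil => exact absurd rfl h0 | cons a l => simp
        simp only [List.singleton_append, List.length_cons, List.length_drop] at h1 ⊢
        omega
      · next hm =>
        have hinf2 : (c0 :: oldt) <:+: t2 := by
          rcases List.infix_cons_iff.mp hinf with hp | hi
          · exact absurd (List.isPrefixOf_iff_prefix.mpr hp) (by simpa using hm)
          · exact hi
        have := ih t2 (by simp only [List.length_cons] at hlen; omega) hinf2
        simp only [List.length_cons]
        omega

-- pvStep facts
lemma pvPunct_eq : pvPunct = ['!','"','#','$','%','&','\'','(',')','*','+',',','-','.','/',':',';','<','=','>','?','@','[','\\',']','^','_','`','{','|','}','~'] := by decide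

lemma pvPunct_facts : (∀ x ∈ pvPunct, x ≠ ' ') ∧ pvPunct.Nodup := by
  rw [pvPunct_eq]
  exact ⟨by simp, by simp [List.nodup_cons]⟩

lemma pvPunct_not_space : ¬ (pvPunct.contains ' ' = true) := by decide

lemma pvStep_head? {c : Char} (hc : pvPunct.contains c = true) (out : List Char) :
    (pvStep out c).head? = some c := by
  unfold pvStep
  rw [if_pos hc]
  by_cases h1 : out.head? = some c
  · rw [if_pos h1]; exact h1
  · rw [if_neg h1]
    by_cases h2 : out.head? = some ' ' ∧ out[1]? = some c
    · rw [if_pos h2]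
      cases out with
      | nil => simp at h2
      | cons a rest =>
        obtain ⟨-, hb⟩ := h2
        simpa [List.head?_eq_getElem?] using hb
    · rw [if_neg h2]; rfl

lemma pvStep_self {c : Char} (hc : pvPunct.contains c = true) {out : List Char}
    (h : out.head? = some c) : pvStep out c = out := by
  unfold pvStep
  rw [if_pos hc, if_pos h]

lemma pvStep_space_collapse (p : Char) (out : List Char) :
    pvStep (pvStep out p) ' ' = ' ' :: pvStep out p := by
  unfold pvStep
  rw [if_neg pvPunct_not_space]

lemma pvStep_psp {p : Char} (hp : pvPunct.contains p = true) (out : List Char) :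
    pvStep (' ' :: pvStep out p) p = pvStep out p := by
  have hne : p ≠ ' ' := pvPunct_facts.1 p (List.contains_iff_mem.mp hp)
  have hh := pvStep_head? hp out
  conv_lhs => rw [pvStep]
  rw [if_pos hp, if_neg (by simp [hne.symm]),
    if_pos ⟨rfl, by simpa [List.head?_eq_getElem?] using hh⟩]
  rfl

-- the streaming pass is invariant under one replace-all of 'pp' -> 'p'
lemma stream_pp (p : Char) (hp : pvPunct.contains p = true) :
    ∀ (t rout : List Char), (pvRepl p [p] [p] t).foldl pvStep rout = t.foldl pvStep rout := by
  suffices H : ∀ (n : Nat) (t rout : List Char), t.length ≤ n →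
      (pvRepl p [p] [p] t).foldl pvStep rout = t.foldl pvStep rout from
    fun t rout => H t.length t rout le_rfl
  intro n
  induction n with
  | zero =>
    intro t rout hlen
    have : t = [] := by cases t with | nil => rfl | cons a t => simp at hlen
    subst this; rw [pvRepl_nil]
  | succ n ih =>
    intro t rout hlen
    cases t with
    | nil => rw [pvRepl_nil]
    | cons c t2 =>
      rw [pvRepl_cons]
      split
      · next hm =>
        obtain ⟨u, hu⟩ := List.isPrefixOf_iff_prefix.mp hm
        simp only [List.cons_append, List.nil_append] at hu
        obtain ⟨hc, ht2⟩ := List.cons.inj hu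
        subst hc
        subst ht2
        simp only [List.length_cons, List.length_nil, List.drop_succ_cons, List.drop_zero,
          List.singleton_append, List.foldl_cons]
        rw [ih u (pvStep rout p) (by simp only [List.length_cons] at hlen; omega)]
        rw [pvStep_self hp (pvStep_head? hp rout)]
      · next hm =>
        simp only [List.foldl_cons]
        exact ih t2 (pvStep rout c) (by simp only [List.length_cons] at hlen; omega)

-- and under one replace-all of 'p p' -> 'p'
lemma stream_psp (p : Char) (hp : pvPunct.contains p = true) :
    ∀ (t rout : List Char), (pvRepl p [' ', p] [p] t).foldl pvStep rout = t.foldl pvStep rout := by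
  suffices H : ∀ (n : Nat) (t rout : List Char), t.length ≤ n →
      (pvRepl p [' ', p] [p] t).foldl pvStep rout = t.foldl pvStep rout from
    fun t rout => H t.length t rout le_rfl
  intro n
  induction n with
  | zero =>
    intro t rout hlen
    have : t = [] := by cases t with | nil => rfl | cons a t => simp at hlen
    subst this; rw [pvRepl_nil]
  | succ n ih =>
    intro t rout hlen
    cases t with
    | nil => rw [pvRepl_nil]
    | cons c t2 =>
      rw [pvRepl_cons]
      split
      · next hm =>
        obtain ⟨u, hu⟩ := List.isPrefixOf_iff_prefix.mp hm
        simp only [List.cons_append, List.nil_append] at hu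
        obtain ⟨hc, ht2⟩ := List.cons.inj hu
        subst hc
        subst ht2
        simp only [List.length_cons, List.length_nil, List.drop_succ_cons, List.drop_zero,
          List.singleton_append, List.foldl_cons]
        rw [ih u (pvStep rout p) (by simp only [List.length_cons] at hlen; omega)]
        rw [pvStep_space_collapse p rout, pvStep_psp hp rout]
      · next hm =>
        simp only [List.foldl_cons]
        exact ih t2 (pvStep rout c) (by simp only [List.length_cons] at hlen; omega)

-- pvWhile-level lemmas
lemma pvWhile_fix (c0 : Char) (oldt : List Char) (h0 : oldt ≠ []) :
    ∀ (n : Nat) (t : List Char), t.length < n →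
      PySem.Chars.isIn (c0 :: oldt) (pvWhile (c0 :: oldt) [c0] n t) = false := by
  intro n
  induction n with
  | zero => intro t hlt; omega
  | succ n ih =>
    intro t hlt
    rw [pvWhile]
    split
    · next h =>
      have hinf : (c0 :: oldt) <:+: t := (PySem.Chars.isIn_iff_infix _ _).mp h
      rw [replace_eq_pvRepl]
      exact ih _ (lt_of_lt_of_le (len_pvRepl_lt c0 oldt h0 t hinf) (Nat.lt_succ_iff.mp hlt))
    · next h => simpa using h

lemma pvWhile_stream (sub rep : List Char)
    (h : ∀ t rout : List Char, (PySem.Chars.replace t sub rep).foldl pvStep rout = t.foldl pvStep rout) :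
    ∀ (n : Nat) (t rout : List Char), (pvWhile sub rep n t).foldl pvStep rout = t.foldl pvStep rout := by
  intro n
  induction n with
  | zero => intro t rout; rfl
  | succ n ih =>
    intro t rout
    rw [pvWhile]
    split
    · rw [ih, h]
    · rfl

lemma pvWhile_pres (sub rep bad : List Char)
    (h : ∀ t : List Char, ¬ bad <:+: t → ¬ bad <:+: PySem.Chars.replace t sub rep) :
    ∀ (n : Nat) (t : List Char), ¬ bad <:+: t → ¬ bad <:+: pvWhile sub rep n t := by
  intro n
  induction n with
  | zero => intro t ht; exact ht
  | succ n ih =>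
    intro t ht
    rw [pvWhile]
    split
    · exact ih _ (h t ht)
    · exact ht

-- one iteration of A's outer for-loop
def pvProc (t : List Char) (p : Char) : List Char :=
  let t1 := pvWhile [p, p] [p] (t.length + 1) t
  pvWhile [p, ' ', p] [p] (t1.length + 1) t1

def pvNormal (p : Char) (t : List Char) : Prop := ¬ [p, p] <:+: t ∧ ¬ [p, ' ', p] <:+: t

lemma pvProc_stream (q : Char) (hq : q ∈ pvPunct) (t rout : List Char) :
    (pvProc t q).foldl pvStep rout = t.foldl pvStep rout := by
  have hq' : pvPunct.contains q = true := List.contains_iff_mem.mpr hq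
  unfold pvProc
  rw [pvWhile_stream _ _ (fun t rout => by rw [replace_eq_pvRepl]; exact stream_psp q hq' t rout),
      pvWhile_stream _ _ (fun t rout => by rw [replace_eq_pvRepl]; exact stream_pp q hq' t rout)]

lemma pvProc_establishes (q : Char) (t : List Char) : pvNormal q (pvProc t q) := by
  unfold pvProc pvNormal
  constructor
  · refine pvWhile_pres _ _ _ (fun t ht => by rw [replace_eq_pvRepl]; exact pp_pvRepl q t ht) _ _ ?_
    have := pvWhile_fix q [q] (by simp) (t.length + 1) t (Nat.lt_succ_self _)
    exact (PySem.Chars.isIn_eq_false_iff _ _).mp this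
  · have := pvWhile_fix q [' ', q] (by simp)
      ((pvWhile [q, q] [q] (t.length + 1) t).length + 1) _ (Nat.lt_succ_self _)
    exact (PySem.Chars.isIn_eq_false_iff _ _).mp this

lemma pvProc_preserves (p q : Char) (hq : q ∈ pvPunct) (hne : q ≠ p) (t : List Char)
    (h : pvNormal p t) : pvNormal p (pvProc t q) := by
  have hqs : q ≠ ' ' := pvPunct_facts.1 q hq
  have h1 : ∀ t : List Char, ¬ [p, p] <:+: t → ¬ [p, p] <:+: PySem.Chars.replace t [q, q] [q] := by
    intro t ht hbad
    rw [replace_eq_pvRepl] at hbad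
    exact ht (infix_pvRepl q [q] t [p, p] (by simp [hne]) (by simp) hbad)
  have h2 : ∀ t : List Char, ¬ [p, p] <:+: t → ¬ [p, p] <:+: PySem.Chars.replace t [q, ' ', q] [q] := by
    intro t ht hbad
    rw [replace_eq_pvRepl] at hbad
    exact ht (infix_pvRepl q [' ', q] t [p, p] (by simp [hne]) (by simp) hbad)
  have h3 : ∀ t : List Char, ¬ [p, ' ', p] <:+: t → ¬ [p, ' ', p] <:+: PySem.Chars.replace t [q, q] [q] := by
    intro t ht hbad
    rw [replace_eq_pvRepl] at hbad
    exact ht (infix_pvRepl q [q] t [p, ' ', p] (by simp [hne, hqs]) (by simp) hbad)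
  have h4 : ∀ t : List Char, ¬ [p, ' ', p] <:+: t → ¬ [p, ' ', p] <:+: PySem.Chars.replace t [q, ' ', q] [q] := by
    intro t ht hbad
    rw [replace_eq_pvRepl] at hbad
    exact ht (infix_pvRepl q [' ', q] t [p, ' ', p] (by simp [hne, hqs]) (by simp) hbad)
  obtain ⟨ha, hb⟩ := h
  exact ⟨pvWhile_pres _ _ _ h2 _ _ (pvWhile_pres _ _ _ h1 _ _ ha),
         pvWhile_pres _ _ _ h4 _ _ (pvWhile_pres _ _ _ h3 _ _ hb)⟩

lemma foldl_proc_stream (ps : List Char) (hps : ∀ q ∈ ps, q ∈ pvPunct) :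
    ∀ (t rout : List Char), (ps.foldl pvProc t).foldl pvStep rout = t.foldl pvStep rout := by
  induction ps with
  | nil => intro t rout; rfl
  | cons q ps' ih =>
    intro t rout
    rw [List.foldl_cons, ih (fun r hr => hps r (List.mem_cons_of_mem _ hr)),
      pvProc_stream q (hps q List.mem_cons_self)]

lemma foldl_proc_preserves (p : Char) (ps : List Char)
    (hps : ∀ q ∈ ps, q ∈ pvPunct ∧ q ≠ p) :
    ∀ t : List Char, pvNormal p t → pvNormal p (ps.foldl pvProc t) := by
  induction ps with
  | nil => intro t h; exact h
  | cons q ps' ih =>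
    intro t h
    rw [List.foldl_cons]
    refine ih (fun r hr => hps r (List.mem_cons_of_mem _ hr)) _ ?_
    obtain ⟨hq1, hq2⟩ := hps q List.mem_cons_self
    exact pvProc_preserves p q hq1 hq2 t h

lemma foldl_proc_normal (ps : List Char) (hnd : ps.Nodup) (hps : ∀ q ∈ ps, q ∈ pvPunct) :
    ∀ (t : List Char) (p : Char), p ∈ ps → pvNormal p (ps.foldl pvProc t) := by
  induction ps with
  | nil => intro t p hp; simp at hp
  | cons q ps' ih =>
    intro t p hp
    rw [List.foldl_cons]
    rcases List.mem_cons.mp hp with rfl | hp'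
    · refine foldl_proc_preserves p ps' ?_ _ (pvProc_establishes p t)
      intro r hr
      exact ⟨hps r (List.mem_cons_of_mem _ hr),
        fun hrp => (List.nodup_cons.mp hnd).1 (hrp ▸ hr)⟩
    · exact ih (List.nodup_cons.mp hnd).2 (fun r hr => hps r (List.mem_cons_of_mem _ hr)) _ p hp'

-- on a fully normalized string the streaming pass is the identity
lemma stream_id : ∀ (t rout : List Char),
    (∀ p ∈ pvPunct, pvNormal p (rout.reverse ++ t)) →
    t.foldl pvStep rout = t.reverse ++ rout := by
  intro t
  induction t with
  | nil => intro rout h; simp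
  | cons c t2 ih =>
    intro rout h
    have hstep : pvStep rout c = c :: rout := by
      unfold pvStep
      by_cases hc : pvPunct.contains c = true
      · rw [if_pos hc]
        have hcm : c ∈ pvPunct := List.contains_iff_mem.mp hc
        have h1 : ¬ rout.head? = some c := by
          intro he
          obtain ⟨r, rfl⟩ : ∃ r, rout = c :: r := by
            cases rout with
            | nil => simp at he
            | cons a r =>
              simp only [List.head?_cons, Option.some.injEq] at he
              exact ⟨r, by rw [he]⟩
          exact (h c hcm).1 ⟨r.reverse, t2, by simp⟩
        have h2 : ¬ (rout.head? = some ' ' ∧ rout[1]? = some c) := by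
          rintro ⟨ha, hb⟩
          obtain ⟨r0, rfl⟩ : ∃ r0, rout = ' ' :: r0 := by
            cases rout with
            | nil => simp at ha
            | cons a r0 =>
              simp only [List.head?_cons, Option.some.injEq] at ha
              exact ⟨r0, by rw [ha]⟩
          obtain ⟨r, rfl⟩ : ∃ r, r0 = c :: r := by
            cases r0 with
            | nil => simp at hb
            | cons a r =>
              simp only [List.getElem?_cons_succ, List.getElem?_cons_zero, Option.some.injEq] at hb
              exact ⟨r, by rw [hb]⟩
          exact (h c hcm).2 ⟨r.reverse, t2, by simp⟩
        rw [if_neg h1, if_neg h2]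
      · rw [if_neg hc]
    rw [List.foldl_cons, hstep, ih (c :: rout) (by
      intro p hp
      have := h p hp
      unfold pvNormal at this ⊢
      simpa [List.append_assoc] using this)]
    simp

-- ===== VERDICT (by name: the statement is the Claim_ definition above) =====
theorem replace_double_punc_spec : Claim_equal_replace_double_punc := by
  intro text _
  unfold Spec_replace_double_punc replace_double_punc replace_double_punc_alt
  show String.ofList (pvPunct.foldl pvProc (PySem.Chars.replace text.toList ['.', '.', '.'] [])) = _
  set t0 := PySem.Chars.replace text.toList ['.', '.', '.'] [] with ht0
  apply congrArg
  have hA := foldl_proc_stream pvPunct (fun q hq => hq) t0 []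
  have hN := foldl_proc_normal pvPunct pvPunct_facts.2 (fun q hq => hq) t0
  have hid := stream_id (pvPunct.foldl pvProc t0) []
    (by intro p hp; simpa using hN p hp)
  have : (pvPunct.foldl pvProc t0).reverse = t0.foldl pvStep [] := by
    rw [← hA, hid]; simp
  rw [← this, List.reverse_reverse]
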